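-- pv_equiv track=rewrite | github.com/tannerstephens/aoc-2020 | day16/run.py | get_invalid_values
-- ===== SOURCE A (Python) =====
-- def matches_rule(n, rule):
--   (low0, high0), (low1, high1) = rule
--
--   return (low0 <= n <= high0) or (low1 <= n <= high1)
--
-- def get_invalid_values(ticket, rules):
--   for n in ticket:
--     good = False
--     for rule in rules:
--       if matches_rule(n, rules[rule]):
--         good = True
--         break
--     if not good: yield n
-- ===== SOURCE B (Python) =====
-- def _covered(merged, n):
--     lo, hi = 0, len(merged)
--     while lo < hi:
--         mid = (lo + hi) // 2
--         l, h = merged[mid]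
--         if n < l:
--             hi = mid
--         elif n > h:
--             lo = mid + 1
--         else:
--             return True
--     return False
--
-- def get_invalid_values(ticket, rules):
--     ivs = sorted((iv for pair in rules.values() for iv in pair if iv[0] <= iv[1]),
--                  key=lambda iv: iv[0])
--     merged = []
--     for lo, hi in ivs:
--         if merged and lo <= merged[-1][1]:
--             if hi > merged[-1][1]:
--                 merged[-1] = (merged[-1][0], hi)
--         else:
--             merged.append((lo, hi))
--     for n in ticket:
--         if not _covered(merged, n):
--             yield n
-- ===== Notes on version B (the rewrite author's own statement) =====
-- stated objective: faster
-- what changed: Instead of testing every value against every rule, B collects all rule intervals once, sorts and merges them into disjoint intervals, and decides each ticket value by binary search over the merged intervals.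
import Mathlib
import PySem

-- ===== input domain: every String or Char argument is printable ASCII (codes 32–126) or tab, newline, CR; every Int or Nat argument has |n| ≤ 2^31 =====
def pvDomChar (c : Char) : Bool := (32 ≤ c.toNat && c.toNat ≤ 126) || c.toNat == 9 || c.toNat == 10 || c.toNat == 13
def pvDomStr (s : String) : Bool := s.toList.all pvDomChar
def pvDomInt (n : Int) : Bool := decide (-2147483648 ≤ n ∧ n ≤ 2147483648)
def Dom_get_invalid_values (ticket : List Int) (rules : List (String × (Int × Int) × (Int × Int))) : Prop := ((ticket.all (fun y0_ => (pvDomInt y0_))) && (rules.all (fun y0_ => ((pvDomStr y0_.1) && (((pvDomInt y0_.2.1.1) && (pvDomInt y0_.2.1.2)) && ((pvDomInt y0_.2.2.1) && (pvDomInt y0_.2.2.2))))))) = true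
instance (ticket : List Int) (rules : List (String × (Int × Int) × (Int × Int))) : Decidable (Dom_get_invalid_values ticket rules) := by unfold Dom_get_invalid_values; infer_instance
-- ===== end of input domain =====

-- B replaces the per-value scan of all rules by one sort-and-merge of the rule
-- intervals followed by a binary search per ticket value (objective: faster).
-- Both Pythons take `rules` as a dict; the assoc-list argument is converted to
-- that dict (PySem.Dict.ofList) at the top of both ports.

-- ===== PORT A =====
def pvMatchesRule (n : Int) (rule : (Int × Int) × (Int × Int)) : Bool :=
  (decide (rule.1.1 ≤ n) && decide (n ≤ rule.1.2)) || (decide (rule.2.1 ≤ n) && decide (n ≤ rule.2.2))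

-- the inner `for rule in rules: … break` loop (good starts False; break returns True)
def pvGoodLoopA (n : Int) (d : PySem.Dict String ((Int × Int) × (Int × Int))) :
    List String → Bool
  | [] => false
  | k :: rest =>
      if pvMatchesRule n (d.getD k ((0, 0), (0, 0))) then true else pvGoodLoopA n d rest

def get_invalid_values (ticket : List Int) (rules : List (String × (Int × Int) × (Int × Int))) : List Int :=
  let d := PySem.Dict.ofList rules
  ticket.foldl (fun acc n => if pvGoodLoopA n d d.keys then acc else acc ++ [n]) []

-- ===== PORT B =====
-- one step of B's merge loop over the sorted intervals (merged[-1] access/update)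
def pvMergeStep (acc : List (Int × Int)) (iv : Int × Int) : List (Int × Int) :=
  match acc.getLast? with
  | some last =>
      if iv.1 ≤ last.2 then
        (if last.2 < iv.2 then acc.dropLast ++ [(last.1, iv.2)] else acc)
      else acc ++ [iv]
  | none => acc ++ [iv]

-- B's hand-written `_covered` binary search (while lo < hi), step for step;
-- the fuel argument only bounds the iteration count and never changes the result
def pvCoveredGo (n : Int) (merged : List (Int × Int)) : Nat → Int → Int → Bool
  | 0, _, _ => false
  | fuel + 1, lo, hi =>
    if lo < hi then
      if n < (PySem.List.pyGetD merged (PySem.Int.floordiv (lo + hi) 2) (0, 0)).1 then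
        pvCoveredGo n merged fuel lo (PySem.Int.floordiv (lo + hi) 2)
      else if (PySem.List.pyGetD merged (PySem.Int.floordiv (lo + hi) 2) (0, 0)).2 < n then
        pvCoveredGo n merged fuel (PySem.Int.floordiv (lo + hi) 2 + 1) hi
      else true
    else false

def get_invalid_values_alt (ticket : List Int) (rules : List (String × (Int × Int) × (Int × Int))) : List Int :=
  let d := PySem.Dict.ofList rules
  let ivs := PySem.List.sorted
      ((d.values.flatMap (fun pair => [pair.1, pair.2])).filter (fun iv => decide (iv.1 ≤ iv.2)))
      (fun iv => iv.1)
  let merged := ivs.foldl pvMergeStep []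
  ticket.foldl
    (fun acc n => if pvCoveredGo n merged (merged.length + 1) 0 (PySem.List.len merged) then acc else acc ++ [n]) []

-- ===== PRECONDITION & SPEC =====
def Spec_get_invalid_values (ticket : List Int) (rules : List (String × (Int × Int) × (Int × Int))) (out : List Int) : Prop := out = get_invalid_values_alt ticket rules
instance (ticket : List Int) (rules : List (String × (Int × Int) × (Int × Int))) (out : List Int) : Decidable (Spec_get_invalid_values ticket rules out) := by unfold Spec_get_invalid_values; infer_instance

-- ===== CLAIM (what is proved, stated in full; the proofs are below) =====
def Claim_equal_get_invalid_values : Prop := ∀ (ticket : List Int) (rules : List (String × (Int × Int) × (Int × Int))), Dom_get_invalid_values ticket rules → Spec_get_invalid_values ticket rules (get_invalid_values ticket rules)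

-- ===== LEMMAS AND PROOFS =====

-- A's inner loop is an `any` over the keys
theorem pvGoodLoopA_eq_any (n : Int) (d : PySem.Dict String ((Int × Int) × (Int × Int)))
    (keys : List String) :
    pvGoodLoopA n d keys = keys.any (fun k => pvMatchesRule n (d.getD k ((0, 0), (0, 0)))) := by
  induction keys with
  | nil => rfl
  | cons k rest ih =>
      by_cases h : pvMatchesRule n (d.getD k ((0, 0), (0, 0))) = true <;> simp [pvGoodLoopA, h, ih]

-- … over a nodup-key dict, that is an `any` over the values
theorem pvGoodLoopA_iff_values (n : Int) (d : PySem.Dict String ((Int × Int) × (Int × Int)))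
    (hn : d.keys.Nodup) :
    pvGoodLoopA n d d.keys = true ↔ ∃ v ∈ d.values, pvMatchesRule n v = true := by
  rw [pvGoodLoopA_eq_any, List.any_eq_true]
  constructor
  · rintro ⟨k, hk, hm⟩
    rcases List.mem_map.1 hk with ⟨p, hp, rfl⟩
    have := PySem.Dict.getD_of_mem_items (d := d) (k := p.1) (v := p.2) (by simpa using hp) hn ((0,0),(0,0))
    exact ⟨p.2, List.mem_map.2 ⟨p, hp, rfl⟩, by rwa [this] at hm⟩
  · rintro ⟨v, hv, hm⟩
    rcases List.mem_map.1 hv with ⟨p, hp, rfl⟩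
    refine ⟨p.1, List.mem_map.2 ⟨p, hp, rfl⟩, ?_⟩
    have := PySem.Dict.getD_of_mem_items (d := d) (k := p.1) (v := p.2) (by simpa using hp) hn ((0,0),(0,0))
    rwa [this]

-- coverage of the sorted, filtered interval list = some rule matching
theorem ivs_cover_iff (d : PySem.Dict String ((Int × Int) × (Int × Int))) (n : Int) :
    (∃ iv ∈ PySem.List.sorted
        ((d.values.flatMap (fun pair => [pair.1, pair.2])).filter (fun iv => decide (iv.1 ≤ iv.2)))
        (fun iv => iv.1), iv.1 ≤ n ∧ n ≤ iv.2)
    ↔ ∃ v ∈ d.values, pvMatchesRule n v = true := by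
  constructor
  · rintro ⟨iv, hiv, h1, h2⟩
    rw [PySem.List.mem_sorted] at hiv
    rcases List.mem_filter.1 hiv with ⟨hmem, -⟩
    rcases List.mem_flatMap.1 hmem with ⟨pair, hp, hin⟩
    refine ⟨pair, hp, ?_⟩
    simp only [List.mem_cons] at hin
    rcases hin with rfl | rfl | h
    · simp [pvMatchesRule]; omega
    · simp [pvMatchesRule]; omega
    · exact absurd h (by simp)
  · rintro ⟨v, hv, hm⟩
    simp only [pvMatchesRule, Bool.or_eq_true, Bool.and_eq_true, decide_eq_true_eq] at hm
    rcases hm with ⟨h1, h2⟩ | ⟨h1, h2⟩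
    · refine ⟨v.1, ?_, h1, h2⟩
      rw [PySem.List.mem_sorted]
      exact List.mem_filter.2 ⟨List.mem_flatMap.2 ⟨v, hv, by simp⟩, by simp; omega⟩
    · refine ⟨v.2, ?_, h1, h2⟩
      rw [PySem.List.mem_sorted]
      exact List.mem_filter.2 ⟨List.mem_flatMap.2 ⟨v, hv, by simp⟩, by simp; omega⟩

-- merge-loop invariant: disjointness, well-formedness and exact coverage
theorem merge_go (ivs : List (Int × Int)) : ∀ (acc : List (Int × Int)),
    acc.Pairwise (fun a b => a.2 < b.1) →
    (∀ iv ∈ acc, iv.1 ≤ iv.2) →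
    ivs.Pairwise (fun a b => a.1 ≤ b.1) →
    (∀ iv ∈ ivs, iv.1 ≤ iv.2) →
    (∀ l, acc.getLast? = some l → ∀ iv ∈ ivs, l.1 ≤ iv.1) →
    (ivs.foldl pvMergeStep acc).Pairwise (fun a b => a.2 < b.1) ∧
    (∀ iv ∈ ivs.foldl pvMergeStep acc, iv.1 ≤ iv.2) ∧
    (∀ n, (∃ iv ∈ ivs.foldl pvMergeStep acc, iv.1 ≤ n ∧ n ≤ iv.2) ↔
          (∃ iv ∈ acc, iv.1 ≤ n ∧ n ≤ iv.2) ∨ (∃ iv ∈ ivs, iv.1 ≤ n ∧ n ≤ iv.2)) := by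
  induction ivs with
  | nil =>
      intro acc h1 h2 _ _ _
      exact ⟨h1, h2, fun n => by simp⟩
  | cons iv rest ih =>
      intro acc h1 h2 h3 h4 h5
      rw [List.pairwise_cons] at h3
      obtain ⟨hiv_rest, h3r⟩ := h3
      have hivwf : iv.1 ≤ iv.2 := h4 iv (by simp)
      have h4r : ∀ b ∈ rest, b.1 ≤ b.2 := fun b hb => h4 b (by simp [hb])
      have key : (pvMergeStep acc iv).Pairwise (fun a b => a.2 < b.1) ∧
          (∀ b ∈ pvMergeStep acc iv, b.1 ≤ b.2) ∧
          (∀ n, (∃ b ∈ pvMergeStep acc iv, b.1 ≤ n ∧ n ≤ b.2) ↔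
                (∃ b ∈ acc, b.1 ≤ n ∧ n ≤ b.2) ∨ (iv.1 ≤ n ∧ n ≤ iv.2)) ∧
          (∀ l, (pvMergeStep acc iv).getLast? = some l → ∀ b ∈ rest, l.1 ≤ b.1) := by
        unfold pvMergeStep
        cases hl : acc.getLast? with
        | none =>
            have hacc : acc = [] := List.getLast?_eq_none_iff.1 hl
            subst hacc
            refine ⟨by simp, by simpa using hivwf, fun n => by simp, ?_⟩
            intro l hl' b hb
            have hll : iv = l := by simpa using hl'
            subst hll
            exact hiv_rest b hb
        | some last =>
            obtain ⟨front, rfl⟩ := List.getLast?_eq_some_iff.1 hl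
            have hlast_le : last.1 ≤ iv.1 := h5 last hl iv (by simp)
            have hlastwf : last.1 ≤ last.2 := h2 last (by simp)
            rw [List.pairwise_append] at h1
            obtain ⟨hfpw, -, hcross⟩ := h1
            have hcross' : ∀ a ∈ front, a.2 < last.1 := fun a ha => hcross a ha last (by simp)
            by_cases hb : iv.1 ≤ last.2
            · simp only [hb, if_true]
              by_cases hc : last.2 < iv.2
              · simp only [hc, if_true, List.dropLast_concat]
                refine ⟨?_, ?_, ?_, ?_⟩
                · rw [List.pairwise_append]
                  refine ⟨hfpw, by simp, ?_⟩
                  intro a ha b hbm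
                  simp at hbm
                  rw [hbm]
                  exact hcross' a ha
                · intro b hbm
                  rcases List.mem_append.1 hbm with h | h
                  · exact h2 b (by simp [h])
                  · simp at h; rw [h]; simp; omega
                · intro n
                  constructor
                  · rintro ⟨b, hbm, hn1, hn2⟩
                    rcases List.mem_append.1 hbm with h | h
                    · exact Or.inl ⟨b, by simp [h], hn1, hn2⟩
                    · simp at h
                      rw [h] at hn1 hn2
                      simp at hn1 hn2
                      by_cases hcase : n ≤ last.2
                      · exact Or.inl ⟨last, by simp, by omega, hcase⟩
                      · exact Or.inr ⟨by omega, by omega⟩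
                  · rintro (⟨b, hbm, hn1, hn2⟩ | ⟨hn1, hn2⟩)
                    · rcases List.mem_append.1 hbm with h | h
                      · exact ⟨b, by simp [h], hn1, hn2⟩
                      · simp at h
                        rw [h] at hn1 hn2
                        exact ⟨(last.1, iv.2), by simp, by simp; omega, by simp; omega⟩
                    · exact ⟨(last.1, iv.2), by simp, by simp; omega, by simp; omega⟩
                · intro l hl' b hbm
                  rw [List.getLast?_concat] at hl'
                  have hll : (last.1, iv.2) = l := by simpa using hl'
                  subst hll
                  exact h5 last hl b (by simp [hbm])
              · simp only [hc, if_false]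
                refine ⟨by rw [List.pairwise_append]; exact ⟨hfpw, by simp, hcross⟩, h2, ?_, ?_⟩
                · intro n
                  constructor
                  · exact fun h => Or.inl h
                  · rintro (h | ⟨hn1, hn2⟩)
                    · exact h
                    · exact ⟨last, by simp, by omega, by omega⟩
                · intro l hl' b hbm
                  rw [hl] at hl'
                  have hll : last = l := by simpa using hl'
                  subst hll
                  exact h5 last hl b (by simp [hbm])
            · simp only [hb, if_false]
              refine ⟨?_, ?_, ?_, ?_⟩
              · rw [List.pairwise_append]
                refine ⟨by rw [List.pairwise_append]; exact ⟨hfpw, by simp, hcross⟩, by simp, ?_⟩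
                intro a ha b hbm
                simp at hbm
                rw [hbm]
                rcases List.mem_append.1 ha with h | h
                · have := hcross' a h; omega
                · simp at h; rw [h]; omega
              · intro b hbm
                rcases List.mem_append.1 hbm with h | h
                · exact h2 b h
                · simp at h; rw [h]; exact hivwf
              · intro n
                constructor
                · rintro ⟨b, hbm, hn1, hn2⟩
                  rcases List.mem_append.1 hbm with h | h
                  · exact Or.inl ⟨b, h, hn1, hn2⟩
                  · simp at h
                    rw [h] at hn1 hn2
                    exact Or.inr ⟨hn1, hn2⟩
                · rintro (⟨b, hbm, hn1, hn2⟩ | ⟨hn1, hn2⟩)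
                  · rcases List.mem_append.1 hbm with h | h
                    · exact ⟨b, by simp [h], hn1, hn2⟩
                    · simp at h
                      exact ⟨b, by simp [h], hn1, hn2⟩
                  · exact ⟨iv, by simp, hn1, hn2⟩
              · intro l hl' b hbm
                rw [List.getLast?_concat] at hl'
                have hll : iv = l := by simpa using hl'
                subst hll
                exact hiv_rest b hbm
      obtain ⟨k1, k2, k3, k4⟩ := key
      obtain ⟨m1, m2, m3⟩ := ih (pvMergeStep acc iv) k1 k2 h3r h4r k4
      refine ⟨by simpa using m1, by simpa using m2, fun n => ?_⟩
      have hstep : (iv :: rest).foldl pvMergeStep acc = rest.foldl pvMergeStep (pvMergeStep acc iv) := rfl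
      rw [hstep, m3 n, k3 n]
      constructor
      · rintro ((h | h) | h)
        · exact Or.inl h
        · exact Or.inr ⟨iv, by simp, h⟩
        · obtain ⟨b, hbm, hc⟩ := h
          exact Or.inr ⟨b, by simp [hbm], hc⟩
      · rintro (h | ⟨b, hbm, hc⟩)
        · exact Or.inl (Or.inl h)
        · rcases List.mem_cons.1 hbm with rfl | h
          · exact Or.inl (Or.inr hc)
          · exact Or.inr ⟨b, h, hc⟩

-- binary search is exact on a disjoint, sorted interval list
theorem covered_go (n : Int) (ms : List (Int × Int))
    (hpw : ms.Pairwise (fun a b => a.2 < b.1)) (hwf : ∀ iv ∈ ms, iv.1 ≤ iv.2) :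
    ∀ (fuel : Nat) (lo hi : Int), 0 ≤ lo → hi ≤ (ms.length : Int) → (hi - lo).toNat < fuel →
    (pvCoveredGo n ms fuel lo hi = true ↔
      ∃ i : Nat, lo ≤ (i : Int) ∧ (i : Int) < hi ∧
        ∃ h : i < ms.length, ms[i].1 ≤ n ∧ n ≤ ms[i].2) := by
  have hmono := List.pairwise_iff_getElem.1 hpw
  intro fuel
  induction fuel with
  | zero => intro lo hi _ _ hf; exact absurd hf (by omega)
  | succ fuel ih =>
      intro lo hi h0 hhi hf
      by_cases hlt : lo < hi
      · have hdiv := PySem.Int.floordiv_eq_ediv_of_pos (a := lo + hi) (b := 2) (by norm_num)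
        have hmb : lo ≤ PySem.Int.floordiv (lo + hi) 2 ∧ PySem.Int.floordiv (lo + hi) 2 < hi := by
          omega
        have hmlen : PySem.Int.floordiv (lo + hi) 2 < (ms.length : Int) := by omega
        have hget : PySem.List.pyGetD ms (PySem.Int.floordiv (lo + hi) 2) (0, 0) =
            ms[(PySem.Int.floordiv (lo + hi) 2).toNat]'(by omega) :=
          PySem.List.pyGetD_eq_getElem ms (0, 0) (by omega) hmlen
        have hstep : pvCoveredGo n ms (fuel + 1) lo hi =
            if lo < hi then
              if n < (PySem.List.pyGetD ms (PySem.Int.floordiv (lo + hi) 2) (0, 0)).1 then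
                pvCoveredGo n ms fuel lo (PySem.Int.floordiv (lo + hi) 2)
              else if (PySem.List.pyGetD ms (PySem.Int.floordiv (lo + hi) 2) (0, 0)).2 < n then
                pvCoveredGo n ms fuel (PySem.Int.floordiv (lo + hi) 2 + 1) hi
              else true
            else false := rfl
        by_cases hcmp : n < (PySem.List.pyGetD ms (PySem.Int.floordiv (lo + hi) 2) (0, 0)).1
        · rw [hstep, if_pos hlt, if_pos hcmp]
          rw [ih lo (PySem.Int.floordiv (lo + hi) 2) h0 (by omega) (by omega)]
          constructor
          · rintro ⟨i, hi1, hi2, hmem, hc⟩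
            exact ⟨i, hi1, by omega, hmem, hc⟩
          · rintro ⟨i, hi1, hi2, hmem, hc1, hc2⟩
            refine ⟨i, hi1, ?_, hmem, hc1, hc2⟩
            by_contra hcon
            have himid : (PySem.Int.floordiv (lo + hi) 2).toNat ≤ i := by omega
            rw [hget] at hcmp
            rcases Nat.eq_or_lt_of_le himid with heq | hlt2
            · subst heq
              omega
            · have hij := hmono (PySem.Int.floordiv (lo + hi) 2).toNat i (by omega) hmem hlt2
              have hwfm : ms[(PySem.Int.floordiv (lo + hi) 2).toNat]'(by omega) ∈ ms :=
                List.getElem_mem _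
              have := hwf _ hwfm
              omega
        · by_cases hcmp2 : (PySem.List.pyGetD ms (PySem.Int.floordiv (lo + hi) 2) (0, 0)).2 < n
          · rw [hstep, if_pos hlt, if_neg hcmp, if_pos hcmp2]
            rw [ih (PySem.Int.floordiv (lo + hi) 2 + 1) hi (by omega) hhi (by omega)]
            constructor
            · rintro ⟨i, hi1, hi2, hmem, hc⟩
              exact ⟨i, by omega, hi2, hmem, hc⟩
            · rintro ⟨i, hi1, hi2, hmem, hc1, hc2⟩
              refine ⟨i, ?_, hi2, hmem, hc1, hc2⟩
              by_contra hcon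
              have himid : i ≤ (PySem.Int.floordiv (lo + hi) 2).toNat := by omega
              rw [hget] at hcmp2
              rcases Nat.eq_or_lt_of_le himid with heq | hlt2
              · subst heq
                omega
              · have hij := hmono i (PySem.Int.floordiv (lo + hi) 2).toNat hmem (by omega) hlt2
                have hwfm : ms[(PySem.Int.floordiv (lo + hi) 2).toNat]'(by omega) ∈ ms :=
                  List.getElem_mem _
                have := hwf _ hwfm
                omega
          · rw [hstep, if_pos hlt, if_neg hcmp, if_neg hcmp2]
            rw [hget] at hcmp hcmp2
            refine iff_of_true rfl ?_
            exact ⟨(PySem.Int.floordiv (lo + hi) 2).toNat, by omega, by omega, by omega, by omega,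
              by omega⟩
      · have hstep : pvCoveredGo n ms (fuel + 1) lo hi =
            if lo < hi then
              if n < (PySem.List.pyGetD ms (PySem.Int.floordiv (lo + hi) 2) (0, 0)).1 then
                pvCoveredGo n ms fuel lo (PySem.Int.floordiv (lo + hi) 2)
              else if (PySem.List.pyGetD ms (PySem.Int.floordiv (lo + hi) 2) (0, 0)).2 < n then
                pvCoveredGo n ms fuel (PySem.Int.floordiv (lo + hi) 2 + 1) hi
              else true
            else false := rfl
        rw [hstep, if_neg hlt]
        simp only [Bool.false_eq_true, false_iff]
        rintro ⟨i, hi1, hi2, -, -⟩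
        omega

-- per ticket value, A's test and B's test agree
theorem cond_eq (rules : List (String × (Int × Int) × (Int × Int))) (n : Int) :
    pvGoodLoopA n (PySem.Dict.ofList rules) (PySem.Dict.ofList rules).keys =
    pvCoveredGo n
      ((PySem.List.sorted
        (((PySem.Dict.ofList rules).values.flatMap (fun pair => [pair.1, pair.2])).filter
          (fun iv => decide (iv.1 ≤ iv.2)))
        (fun iv => iv.1)).foldl pvMergeStep [])
      (((PySem.List.sorted
        (((PySem.Dict.ofList rules).values.flatMap (fun pair => [pair.1, pair.2])).filter
          (fun iv => decide (iv.1 ≤ iv.2)))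
        (fun iv => iv.1)).foldl pvMergeStep []).length + 1)
      0 (PySem.List.len ((PySem.List.sorted
        (((PySem.Dict.ofList rules).values.flatMap (fun pair => [pair.1, pair.2])).filter
          (fun iv => decide (iv.1 ≤ iv.2)))
        (fun iv => iv.1)).foldl pvMergeStep [])) := by
  have hn := PySem.Dict.nodup_keys_ofList rules
  set d := PySem.Dict.ofList rules with hd
  set ivs := PySem.List.sorted
      ((d.values.flatMap (fun pair => [pair.1, pair.2])).filter (fun iv => decide (iv.1 ≤ iv.2)))
      (fun iv => iv.1) with hivs
  have hsorted : ivs.Pairwise (fun a b => a.1 ≤ b.1) := PySem.List.sorted_pairwise _ _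
  have hwf : ∀ iv ∈ ivs, iv.1 ≤ iv.2 := by
    intro iv hiv
    rw [hivs, PySem.List.mem_sorted] at hiv
    have := (List.mem_filter.1 hiv).2
    simpa using this
  obtain ⟨hpw, hwfm, hcov⟩ := merge_go ivs [] (by simp) (by simp) hsorted hwf (by simp)
  rw [Bool.eq_iff_iff, pvGoodLoopA_iff_values n d hn,
      PySem.List.len_eq (ivs.foldl pvMergeStep []),
      covered_go n (ivs.foldl pvMergeStep []) hpw hwfm ((ivs.foldl pvMergeStep []).length + 1)
        0 ((ivs.foldl pvMergeStep []).length : Int) (by omega) (le_refl _) (by omega)]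
  have hiff1 : (∃ v ∈ d.values, pvMatchesRule n v = true) ↔
      (∃ iv ∈ ivs.foldl pvMergeStep [], iv.1 ≤ n ∧ n ≤ iv.2) := by
    rw [hcov n]
    simp only [List.not_mem_nil, false_and, exists_false, false_or]
    exact (ivs_cover_iff d n).symm
  have hiff2 : (∃ iv ∈ ivs.foldl pvMergeStep [], iv.1 ≤ n ∧ n ≤ iv.2) ↔
      (∃ i : Nat, (0 : Int) ≤ (i : Int) ∧ (i : Int) < ((ivs.foldl pvMergeStep []).length : Int) ∧
        ∃ h : i < (ivs.foldl pvMergeStep []).length,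
          ((ivs.foldl pvMergeStep [])[i]).1 ≤ n ∧ n ≤ ((ivs.foldl pvMergeStep [])[i]).2) := by
    constructor
    · rintro ⟨iv, hiv, hc1, hc2⟩
      rcases List.mem_iff_getElem.1 hiv with ⟨i, hilen, heq⟩
      rw [← heq] at hc1 hc2
      exact ⟨i, by omega, by exact_mod_cast hilen, hilen, hc1, hc2⟩
    · rintro ⟨i, -, -, hilen, hc1, hc2⟩
      exact ⟨(ivs.foldl pvMergeStep [])[i], List.getElem_mem _, hc1, hc2⟩
  exact hiff1.trans hiff2

-- ===== VERDICT (by name: the statement is the Claim_ definition above) =====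
theorem get_invalid_values_spec : Claim_equal_get_invalid_values := by
  intro ticket rules _
  show get_invalid_values ticket rules = get_invalid_values_alt ticket rules
  simp only [get_invalid_values, get_invalid_values_alt]
  congr 1
  funext acc n
  rw [cond_eq rules n]
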